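-- pv_equiv track=rewrite | github.com/mfisher87/fetchez | src/fetchez/cli.py | get_module_cli_desc
-- ===== SOURCE A (Python) =====
-- from typing import Dict, Optional, Any
--
-- def get_module_cli_desc(m: Dict) -> str:
--     """Generates a formatted, categorized list of modules using Registry metadata."""
--
--     CATEGORY_ORDER = [
--         "Topography",
--         "Bathymetry",
--         "Oceanography",
--         "Imagery",
--         "Reference",
--         "Generic",
--     ]
--     grouped_modules: Dict[Any, Any] = {}
--
--     for key, val in m.items():
--         cat = val.get("category", "Generic")
--         if cat not in grouped_modules:
--             grouped_modules[cat] = []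
--
--         desc = val.get("desc", f"Fetch data from {key}")
--         grouped_modules[cat].append((key, desc))
--
--     rows = []
--     existing_cats = [c for c in CATEGORY_ORDER if c in grouped_modules]
--     remaining_cats = sorted([c for c in grouped_modules if c not in CATEGORY_ORDER])
--
--     for cat in existing_cats + remaining_cats:
--         rows.append(f"\n\033[1;4m{cat}\033[0m")
--         for name, desc in sorted(grouped_modules[cat], key=lambda x: x[0]):
--             rows.append(f"  \033[1m{name:<18}\033[0m : {desc}")
--
--     return "\n".join(rows)
-- ===== SOURCE B (Python) =====
-- def get_module_cli_desc(m):
--     """Generates a formatted, categorized list of modules using Registry metadata."""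
--
--     CATEGORY_ORDER = [
--         "Topography",
--         "Bathymetry",
--         "Oceanography",
--         "Imagery",
--         "Reference",
--         "Generic",
--     ]
--
--     # ordered distinct categories as they appear in m
--     present = []
--     for val in m.values():
--         c = val.get("category", "Generic")
--         if c not in present:
--             present.append(c)
--
--     ordered = [c for c in CATEGORY_ORDER if c in present] + sorted(
--         c for c in present if c not in CATEGORY_ORDER
--     )
--     rank = {c: i for i, c in enumerate(ordered)}
--
--     # one flat list, one sort by (category rank, module name)
--     entries = sorted(
--         (
--             (
--                 rank[val.get("category", "Generic")],
--                 key,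
--                 val.get("category", "Generic"),
--                 val.get("desc", f"Fetch data from {key}"),
--             )
--             for key, val in m.items()
--         ),
--         key=lambda t: (t[0], t[1]),
--     )
--
--     lines = []
--     prev = None
--     for r, name, cat, desc in entries:
--         if r != prev:
--             lines.append(f"\n\033[1;4m{cat}\033[0m")
--             prev = r
--         lines.append(f"  \033[1m{name:<18}\033[0m : {desc}")
--     return "\n".join(lines)
-- ===== Notes on version B (the rewrite author's own statement) =====
-- stated objective: alternative
-- what changed: A builds a category->modules dict and sorts each category's modules separately inside the output loop; B flattens everything into one list of (rank, name, category, desc) tuples, sorts it once by (rank, name) via a category-rank dict, and emits headers in a single pass whenever the rank changes.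
import Mathlib
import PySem

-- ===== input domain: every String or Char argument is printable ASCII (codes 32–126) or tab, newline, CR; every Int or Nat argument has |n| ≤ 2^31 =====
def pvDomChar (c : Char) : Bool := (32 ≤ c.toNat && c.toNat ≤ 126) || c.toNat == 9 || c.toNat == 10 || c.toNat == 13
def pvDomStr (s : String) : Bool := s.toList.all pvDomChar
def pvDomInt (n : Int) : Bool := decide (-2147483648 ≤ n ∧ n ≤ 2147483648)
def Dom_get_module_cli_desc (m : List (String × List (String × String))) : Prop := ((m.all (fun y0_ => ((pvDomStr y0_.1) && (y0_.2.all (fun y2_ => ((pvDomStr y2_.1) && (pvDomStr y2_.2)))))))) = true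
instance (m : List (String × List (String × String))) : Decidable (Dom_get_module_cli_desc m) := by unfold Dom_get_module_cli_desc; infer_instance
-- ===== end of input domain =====

-- B replaces A's per-category grouping dict + per-category sorts by one flat list of
-- (rank, name, category, desc) tuples sorted once by (rank, name) and a single emission
-- pass that prints a header whenever the rank changes (objective: alternative decomposition).

-- ===== PORT A =====
def pvOrderA : List String :=
  ["Topography", "Bathymetry", "Oceanography", "Imagery", "Reference", "Generic"]

-- f"\n\033[1;4m{cat}\033[0m"
def pvHeaderA (cat : String) : String := "\n\x1b[1;4m" ++ cat ++ "\x1b[0m"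

-- f"  \033[1m{name:<18}\033[0m : {desc}"  ({name:<18} = pad right with spaces to 18 chars; exact)
def pvRowA (name desc : String) : String :=
  "  \x1b[1m" ++ name ++ String.ofList (List.replicate (18 - name.toList.length) ' ') ++ "\x1b[0m : " ++ desc

def get_module_cli_desc (m : List (String × List (String × String))) : String :=
  -- for key, val in m.items(): group (key, desc) under its category
  let grouped : PySem.Dict String (List (String × String)) :=
    m.foldl (fun g kv =>
      let val : PySem.Dict String String := ⟨kv.2⟩
      let cat := val.getD "category" "Generic"
      let g := if g.contains cat then g else g.insert cat []
      let desc := val.getD "desc" ("Fetch data from " ++ kv.1)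
      -- grouped[cat].append((key, desc)) ; cat is a key of g here, so KeyError is impossible
      g.modify cat [] (fun l => l ++ [(kv.1, desc)])) ⟨[]⟩
  let existing_cats := pvOrderA.filter (fun c => grouped.contains c)
  let remaining_cats :=
    PySem.List.sorted (grouped.keys.filter (fun c => !pvOrderA.contains c)) (fun c => c) false
  let rows := (existing_cats ++ remaining_cats).foldl (fun rows cat =>
      let rows := rows ++ [pvHeaderA cat]
      -- grouped_modules[cat]: cat is always a key here, so the total getD is exact
      (PySem.List.sorted (grouped.getD cat []) (fun x => x.1) false).foldl
        (fun rows nd => rows ++ [pvRowA nd.1 nd.2]) rows) []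
  PySem.Str.join "\n" rows

-- ===== PORT B =====
def pvOrderB : List String :=
  ["Topography", "Bathymetry", "Oceanography", "Imagery", "Reference", "Generic"]

def pvHeaderB (cat : String) : String := "\n\x1b[1;4m" ++ cat ++ "\x1b[0m"

def pvRowB (name desc : String) : String :=
  "  \x1b[1m" ++ name ++ String.ofList (List.replicate (18 - name.toList.length) ' ') ++ "\x1b[0m : " ++ desc

def get_module_cli_desc_alt (m : List (String × List (String × String))) : String :=
  -- ordered distinct categories as they appear in m ("if c not in present: present.append(c)")
  let present : PySem.Set String :=
    m.foldl (fun s kv => PySem.Set.add s ((⟨kv.2⟩ : PySem.Dict String String).getD "category" "Generic")) []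
  let ordered := pvOrderB.filter (fun c => present.contains c)
      ++ PySem.List.sorted (present.filter (fun c => !pvOrderB.contains c)) (fun c => c) false
  -- rank = {c: i for i, c in enumerate(ordered)}
  let rank : PySem.Dict String Int :=
    (PySem.List.enumerate ordered).foldl (fun d ic => d.insert ic.2 ic.1) ⟨[]⟩
  -- one flat list, one sort by (category rank, module name); rank[cat] never raises (total getD is exact)
  let entries := PySem.List.sorted2
    (m.map (fun kv =>
      let val : PySem.Dict String String := ⟨kv.2⟩
      (rank.getD (val.getD "category" "Generic") 0, kv.1,
       val.getD "category" "Generic", val.getD "desc" ("Fetch data from " ++ kv.1))))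
    (fun t => t.1) (fun t => t.2.1) false
  -- single pass: emit a header whenever the rank changes (prev : Option Int models prev = None)
  let res := entries.foldl (fun (st : List String × Option Int) t =>
      let st := if st.2 ≠ some t.1 then (st.1 ++ [pvHeaderB t.2.2.1], some t.1) else st
      (st.1 ++ [pvRowB t.2.1 t.2.2.2], st.2)) ([], none)
  PySem.Str.join "\n" res.1

-- ===== PRECONDITION & SPEC =====
-- Pre_ excludes association lists with duplicate keys (outer module names or keys inside a
-- module's metadata dict): such lists do not represent Python dicts — dict() collapses the
-- duplicates — so the ports' first-match reading of them matches no Python behaviour.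
def Pre_get_module_cli_desc (m : List (String × List (String × String))) : Prop :=
  (m.map Prod.fst).Nodup ∧ ∀ kv ∈ m, (kv.2.map Prod.fst).Nodup
instance (m : List (String × List (String × String))) : Decidable (Pre_get_module_cli_desc m) := by
  unfold Pre_get_module_cli_desc; infer_instance

def pvWitness_get_module_cli_desc : (List (String × List (String × String))) :=
  [("gebco", [("category", "Bathymetry"), ("desc", "GEBCO grids")]), ("misc", [])]

def Spec_get_module_cli_desc (m : List (String × List (String × String))) (out : String) : Prop := out = get_module_cli_desc_alt m
instance (m : List (String × List (String × String))) (out : String) : Decidable (Spec_get_module_cli_desc m out) := by unfold Spec_get_module_cli_desc; infer_instance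

-- ===== CLAIM (what is proved, stated in full; the proofs are below) =====
def Claim_equal_get_module_cli_desc : Prop := ∀ (m : List (String × List (String × String))), Dom_get_module_cli_desc m → Pre_get_module_cli_desc m → Spec_get_module_cli_desc m (get_module_cli_desc m)

-- ===== LEMMAS AND PROOFS =====

-- proof-side abbreviations for the data both ports extract from an item
def pvCat (kv : String × List (String × String)) : String :=
  (⟨kv.2⟩ : PySem.Dict String String).getD "category" "Generic"

def pvDesc (kv : String × List (String × String)) : String :=
  (⟨kv.2⟩ : PySem.Dict String String).getD "desc" ("Fetch data from " ++ kv.1)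

-- A's grouping step (definitionally the fold body of port A) and the grouping dict
def pvStep (g : PySem.Dict String (List (String × String))) (kv : String × List (String × String)) :
    PySem.Dict String (List (String × String)) :=
  (if g.contains (pvCat kv) then g else g.insert (pvCat kv) []).modify (pvCat kv) []
    (fun l => l ++ [(kv.1, pvDesc kv)])

def pvGroup (m : List (String × List (String × String))) : PySem.Dict String (List (String × String)) :=
  m.foldl pvStep ⟨[]⟩

def pvPres (m : List (String × List (String × String))) : PySem.Set String :=
  m.foldl (fun s kv => PySem.Set.add s (pvCat kv)) []

def pvCats (m : List (String × List (String × String))) : List String :=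
  pvOrderA.filter (fun c => (pvPres m).contains c)
  ++ PySem.List.sorted ((pvPres m).filter (fun c => !pvOrderA.contains c)) (fun c => c) false

def pvSortedGroup (m : List (String × List (String × String))) (c : String) : List (String × String) :=
  PySem.List.sorted ((pvGroup m).getD c []) (fun x => x.1) false

def pvBlockOut (m : List (String × List (String × String))) (c : String) : List String :=
  pvHeaderA c :: (pvSortedGroup m c).map (fun nd => pvRowA nd.1 nd.2)

def pvRows (m : List (String × List (String × String))) : List String :=
  (pvCats m).flatMap (pvBlockOut m)

def pvRank (m : List (String × List (String × String))) : PySem.Dict String Int :=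
  (PySem.List.enumerate (pvCats m)).foldl (fun d ic => d.insert ic.2 ic.1) ⟨[]⟩

def pvEntry (m : List (String × List (String × String))) (kv : String × List (String × String)) :
    Int × String × String × String :=
  ((pvRank m).getD (pvCat kv) 0, kv.1, pvCat kv, pvDesc kv)

def pvT (m : List (String × List (String × String))) : List (Int × String × String × String) :=
  (PySem.List.enumerate (pvCats m)).flatMap
    (fun ic => (pvSortedGroup m ic.2).map (fun nd => (ic.1, nd.1, ic.2, nd.2)))

def pvLex (a b : Int × String × String × String) : Prop :=
  a.1 < b.1 ∨ (a.1 = b.1 ∧ a.2.1 < b.2.1)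

def pvEmit (st : List String × Option Int) (t : Int × String × String × String) :
    List String × Option Int :=
  let st := if st.2 ≠ some t.1 then (st.1 ++ [pvHeaderB t.2.2.1], some t.1) else st
  (st.1 ++ [pvRowB t.2.1 t.2.2.2], st.2)

-- ===== the grouping dict of port A, characterised =====

theorem pv_contains_eq (g : PySem.Dict String (List (String × String))) (c : String) :
    g.contains c = PySem.Set.contains g.keys c := by
  rw [PySem.Dict.contains_eq_decide_mem_keys]
  simp [PySem.Set.contains]

theorem pv_keys_step (g : PySem.Dict String (List (String × String)))
    (kv : String × List (String × String)) :
    (pvStep g kv).keys = PySem.Set.add g.keys (pvCat kv) := by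
  unfold pvStep PySem.Set.add
  rw [PySem.Dict.keys_modify]
  by_cases h : g.contains (pvCat kv) = true
  · rw [if_pos h, if_pos]
    · exact PySem.Dict.keys_insert_of_contains _ _ h
    · rw [← pv_contains_eq]; exact h
  · have hf : g.contains (pvCat kv) = false := by simpa using h
    rw [if_neg h, if_neg]
    · rw [PySem.Dict.keys_insert_of_contains, PySem.Dict.keys_insert_of_not_contains _ _ hf]
      exact PySem.Dict.contains_insert_self _ _ _
    · rw [← pv_contains_eq, hf]; simp

theorem pv_getD_step (g : PySem.Dict String (List (String × String)))
    (kv : String × List (String × String)) (c : String) :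
    (pvStep g kv).getD c [] =
      if pvCat kv = c then g.getD c [] ++ [(kv.1, pvDesc kv)] else g.getD c [] := by
  unfold pvStep
  rw [PySem.Dict.getD_modify]
  by_cases h : g.contains (pvCat kv) = true
  · rw [if_pos h]
    by_cases hc : c = pvCat kv
    · rw [if_pos hc, if_pos hc.symm, hc]
    · rw [if_neg hc, if_neg (fun h' : pvCat kv = c => hc h'.symm)]
  · have hf : g.contains (pvCat kv) = false := by simpa using h
    rw [if_neg h]
    by_cases hc : c = pvCat kv
    · rw [if_pos hc, if_pos hc.symm, hc, PySem.Dict.getD_insert_self,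
        PySem.Dict.getD_of_not_contains _ _ hf]
    · rw [if_neg hc, if_neg (fun h' : pvCat kv = c => hc h'.symm),
        PySem.Dict.getD_insert, if_neg hc]

theorem pv_group_keys_aux (m : List (String × List (String × String)))
    (g : PySem.Dict String (List (String × String))) :
    (m.foldl pvStep g).keys = m.foldl (fun s kv => PySem.Set.add s (pvCat kv)) g.keys := by
  induction m generalizing g with
  | nil => rfl
  | cons kv m ih => simp only [List.foldl_cons, ih, pv_keys_step]

theorem pv_group_keys (m : List (String × List (String × String))) :
    (pvGroup m).keys = pvPres m := by
  unfold pvGroup pvPres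
  rw [pv_group_keys_aux]
  rfl

theorem pv_group_getD_aux (m : List (String × List (String × String)))
    (g : PySem.Dict String (List (String × String))) (c : String) :
    (m.foldl pvStep g).getD c [] =
      g.getD c [] ++ (m.filter (fun kv => pvCat kv == c)).map (fun kv => (kv.1, pvDesc kv)) := by
  induction m generalizing g with
  | nil => simp
  | cons kv m ih =>
    simp only [List.foldl_cons, ih, pv_getD_step]
    by_cases hc : pvCat kv = c
    · simp [hc]
    · simp [hc]

theorem pv_group_getD (m : List (String × List (String × String))) (c : String) :
    (pvGroup m).getD c [] =
      (m.filter (fun kv => pvCat kv == c)).map (fun kv => (kv.1, pvDesc kv)) := by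
  unfold pvGroup
  rw [pv_group_getD_aux]
  simp [PySem.Dict.getD, PySem.Dict.get?]

theorem pv_pres_eq (m : List (String × List (String × String))) :
    pvPres m = PySem.Set.ofList (m.map pvCat) := by
  rw [PySem.Set.ofList_eq_foldl, List.foldl_map]
  rfl

theorem pv_mem_pres (m : List (String × List (String × String))) (c : String) :
    c ∈ pvPres m ↔ ∃ kv ∈ m, pvCat kv = c := by
  rw [pv_pres_eq, PySem.Set.mem_ofList]
  simp

theorem pv_pres_nodup (m : List (String × List (String × String))) : (pvPres m).Nodup := by
  rw [pv_pres_eq]; exact PySem.Set.nodup_ofList _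

theorem pv_cats_nodup (m : List (String × List (String × String))) : (pvCats m).Nodup := by
  unfold pvCats
  apply List.Nodup.append
  · exact List.Nodup.filter _ (by decide)
  · exact ((PySem.List.sorted_perm _ _ _).nodup_iff).mpr ((pv_pres_nodup m).filter _)
  · intro c hc1 hc2
    rw [List.mem_filter] at hc1
    rw [PySem.List.mem_sorted, List.mem_filter] at hc2
    have h2 : c ∉ pvOrderA := by simpa using hc2.2
    exact h2 hc1.1

theorem pv_mem_cats (m : List (String × List (String × String))) (c : String) :
    c ∈ pvCats m ↔ c ∈ pvPres m := by
  unfold pvCats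
  rw [List.mem_append, List.mem_filter, PySem.List.mem_sorted, List.mem_filter]
  constructor
  · rintro (⟨_, h⟩ | ⟨h, _⟩)
    · exact (PySem.Set.contains_iff _ c).mp h
    · exact h
  · intro h
    by_cases ho : c ∈ pvOrderA
    · exact Or.inl ⟨ho, by rwa [PySem.Set.contains_iff]⟩
    · exact Or.inr ⟨h, by simpa using ho⟩

-- ===== enumerate and the rank dict =====

theorem pv_enum_fst_le {α : Type} (l : List α) (s : Int) (p : Int × α)
    (h : p ∈ PySem.List.enumerate l s) : s ≤ p.1 := by
  induction l generalizing s with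
  | nil => simp [PySem.List.enumerate] at h
  | cons x xs ih =>
    rw [PySem.List.enumerate_cons, List.mem_cons] at h
    rcases h with h | h
    · simp [h]
    · have := ih (s + 1) h; omega

theorem pv_enum_snd_mem {α : Type} (l : List α) (s : Int) (p : Int × α)
    (h : p ∈ PySem.List.enumerate l s) : p.2 ∈ l := by
  induction l generalizing s with
  | nil => simp [PySem.List.enumerate] at h
  | cons x xs ih =>
    rw [PySem.List.enumerate_cons, List.mem_cons] at h
    rcases h with h | h
    · simp [h]
    · exact List.mem_cons_of_mem _ (ih (s + 1) h)

theorem pv_enum_pairwise {α : Type} (l : List α) (s : Int) :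
    (PySem.List.enumerate l s).Pairwise (fun p q => p.1 < q.1) := by
  induction l generalizing s with
  | nil => simp [PySem.List.enumerate]
  | cons x xs ih =>
    rw [PySem.List.enumerate_cons]
    exact List.Pairwise.cons (fun q hq => by have := pv_enum_fst_le xs (s+1) q hq; omega) (ih (s+1))

theorem pv_flatMap_enum {α β : Type} (l : List α) (s : Int) (g : α → List β) :
    (PySem.List.enumerate l s).flatMap (fun ic => g ic.2) = l.flatMap g := by
  induction l generalizing s with
  | nil => simp [PySem.List.enumerate]
  | cons x xs ih => rw [PySem.List.enumerate_cons]; simp [ih]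

theorem pv_rank_skip (l : List String) (s : Int) (d : PySem.Dict String Int) (c : String)
    (h : c ∉ l) :
    ((PySem.List.enumerate l s).foldl (fun d ic => d.insert ic.2 ic.1) d).getD c 0 = d.getD c 0 := by
  induction l generalizing s d with
  | nil => simp [PySem.List.enumerate]
  | cons x xs ih =>
    rw [PySem.List.enumerate_cons]
    simp only [List.foldl_cons]
    rw [ih _ _ (fun hc => h (List.mem_cons_of_mem _ hc)),
      PySem.Dict.getD_insert, if_neg (by rintro rfl; exact h List.mem_cons_self)]

theorem pv_rank_mem (l : List String) (s : Int) (d : PySem.Dict String Int) (i : Int) (c : String)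
    (hl : l.Nodup) (h : (i, c) ∈ PySem.List.enumerate l s) :
    ((PySem.List.enumerate l s).foldl (fun d ic => d.insert ic.2 ic.1) d).getD c 0 = i := by
  induction l generalizing s d with
  | nil => simp [PySem.List.enumerate] at h
  | cons x xs ih =>
    rw [PySem.List.enumerate_cons, List.mem_cons] at h
    rw [PySem.List.enumerate_cons]
    simp only [List.foldl_cons]
    rcases h with h | h
    · rw [Prod.mk.injEq] at h
      obtain ⟨hi, hc⟩ := h
      subst hi; subst hc
      have hx : c ∉ xs := (List.nodup_cons.mp hl).1
      rw [pv_rank_skip _ _ _ _ hx, PySem.Dict.getD_insert, if_pos rfl]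
    · exact ih (s+1) _ (List.nodup_cons.mp hl).2 h

-- ===== a Python stable sort with pairwise strictly increasing (rank, name) keys is unique =====

theorem pv_insertBy_pairwise {α : Type} (le : α → α → Prop) (before : α → α → Bool)
    (h1 : ∀ a b, before a b = true → le a b) (h2 : ∀ a b, before a b = false → le b a)
    (ht : ∀ {a b c}, le a b → le b c → le a c) (x : α) (ys : List α) (hys : ys.Pairwise le) :
    (PySem.List.insertBy before x ys).Pairwise le := by
  induction ys with
  | nil => simp [PySem.List.insertBy]
  | cons y ys ih =>
    rw [List.pairwise_cons] at hys
    by_cases hb : before x y = true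
    · rw [show PySem.List.insertBy before x (y :: ys) = x :: y :: ys by
        simp [PySem.List.insertBy, hb]]
      refine List.Pairwise.cons ?_ (List.Pairwise.cons hys.1 hys.2)
      intro z hz
      rcases List.mem_cons.mp hz with rfl | hz
      · exact h1 _ _ hb
      · exact ht (h1 _ _ hb) (hys.1 z hz)
    · have hb' : before x y = false := by simpa using hb
      rw [show PySem.List.insertBy before x (y :: ys) = y :: PySem.List.insertBy before x ys by
        simp [PySem.List.insertBy, hb']]
      refine List.Pairwise.cons ?_ (ih hys.2)
      intro z hz
      rcases (PySem.List.insertBy_mem_iff before x z ys).mp hz with rfl | hz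
      · exact h2 _ _ hb'
      · exact hys.1 z hz

theorem pv_foldl_insertBy_pairwise {α : Type} (le : α → α → Prop) (before : α → α → Bool)
    (h1 : ∀ a b, before a b = true → le a b) (h2 : ∀ a b, before a b = false → le b a)
    (ht : ∀ {a b c}, le a b → le b c → le a c) (xs acc : List α) (hacc : acc.Pairwise le) :
    (xs.foldl (fun acc x => PySem.List.insertBy before x acc) acc).Pairwise le := by
  induction xs generalizing acc with
  | nil => exact hacc
  | cons x xs ih =>
    exact ih _ (pv_insertBy_pairwise le before h1 h2 ht x acc hacc)

theorem pv_sorted2_eq {α κ₁ κ₂ : Type} [LinearOrder κ₁] [LinearOrder κ₂]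
    (xs ys : List α) (k1 : α → κ₁) (k2 : α → κ₂) (hperm : ys.Perm xs)
    (hp : ys.Pairwise (fun a b => k1 a < k1 b ∨ (k1 a = k1 b ∧ k2 a < k2 b))) :
    PySem.List.sorted2 xs k1 k2 false = ys := by
  set le := fun a b => k1 a < k1 b ∨ (k1 a = k1 b ∧ k2 a ≤ k2 b) with hle
  set before := fun a b => decide (k1 a < k1 b) || (!decide (k1 b < k1 a) && decide (k2 a < k2 b))
    with hbef
  have hout_eq : PySem.List.sorted2 xs k1 k2 false
      = xs.foldl (fun acc x => PySem.List.insertBy before x acc) [] := rfl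
  have h1 : ∀ a b, before a b = true → le a b := by
    intro a b hb
    simp only [hbef, Bool.or_eq_true, Bool.and_eq_true, Bool.not_eq_true', decide_eq_true_eq,
      decide_eq_false_iff_not] at hb
    rcases hb with hb | ⟨hb1, hb2⟩
    · exact Or.inl hb
    · rcases lt_trichotomy (k1 a) (k1 b) with h | h | h
      · exact Or.inl h
      · exact Or.inr ⟨h, le_of_lt hb2⟩
      · exact absurd h hb1
  have h2 : ∀ a b, before a b = false → le b a := by
    intro a b hb
    simp only [hbef, Bool.or_eq_false_iff, Bool.and_eq_false_iff, Bool.not_eq_false',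
      decide_eq_true_eq, decide_eq_false_iff_not] at hb
    obtain ⟨hb1, hb2⟩ := hb
    rcases hb2 with hb2 | hb2
    · exact Or.inl hb2
    · rcases lt_trichotomy (k1 a) (k1 b) with h | h | h
      · exact absurd h hb1
      · exact Or.inr ⟨h.symm, le_of_not_gt hb2⟩
      · exact Or.inl h
  have ht : ∀ {a b c : α}, le a b → le b c → le a c := by
    rintro a b c (h | ⟨h1', h2'⟩) (h' | ⟨h1'', h2''⟩)
    · exact Or.inl (lt_trans h h')
    · exact Or.inl (h1'' ▸ h)
    · exact Or.inl (h1' ▸ h')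
    · exact Or.inr ⟨h1'.trans h1'', h2'.trans h2''⟩
  have hout_pw : (PySem.List.sorted2 xs k1 k2 false).Pairwise le := by
    rw [hout_eq]
    exact pv_foldl_insertBy_pairwise le before h1 h2 ht xs [] List.Pairwise.nil
  have hys_pw : ys.Pairwise le := hp.imp (by
    rintro a b (h | ⟨h1', h2'⟩)
    · exact Or.inl h
    · exact Or.inr ⟨h1', le_of_lt h2'⟩)
  have hperm' : (PySem.List.sorted2 xs k1 k2 false).Perm ys :=
    (PySem.List.sorted2_perm xs k1 k2 false).trans hperm.symm
  have hne : ys.Pairwise (fun a b => ¬(k1 a = k1 b ∧ k2 a = k2 b)) := hp.imp (by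
    rintro a b (h | ⟨h1', h2'⟩) ⟨he1, he2⟩
    · exact absurd (he1 ▸ h) (lt_irrefl _)
    · exact absurd (he2 ▸ h2') (lt_irrefl _))
  have hsym : Symmetric (fun a b : α => ¬(k1 a = k1 b ∧ k2 a = k2 b)) := by
    intro a b h ⟨e1, e2⟩; exact h ⟨e1.symm, e2.symm⟩
  have hanti : ∀ a b : α, a ∈ PySem.List.sorted2 xs k1 k2 false → b ∈ ys → le a b → le b a → a = b := by
    intro a b ha hb lab lba
    have ha' : a ∈ ys := hperm'.subset ha
    by_contra hab
    have hkeys : k1 a = k1 b ∧ k2 a = k2 b := by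
      rcases lab with h | ⟨e1, e2⟩ <;> rcases lba with h' | ⟨e1', e2'⟩
      · exact absurd (lt_trans h h') (lt_irrefl _)
      · exact absurd (e1' ▸ h) (lt_irrefl _)
      · exact absurd (e1 ▸ h') (lt_irrefl _)
      · exact ⟨e1, le_antisymm e2 e2'⟩
    exact (hne.forall hsym ha' hb hab) hkeys
  exact hperm'.eq_of_pairwise hanti hout_pw hys_pw

-- ===== the flat sorted list of port B is exactly A's ordered blocks =====

theorem pv_rank_getD (m : List (String × List (String × String))) (i : Int) (c : String)
    (h : (i, c) ∈ PySem.List.enumerate (pvCats m)) : (pvRank m).getD c 0 = i :=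
  pv_rank_mem (pvCats m) 0 ⟨[]⟩ i c (pv_cats_nodup m) h

theorem pv_flatMap_congr {α β : Type} (l : List α) (f g : α → List β)
    (h : ∀ x ∈ l, f x = g x) : l.flatMap f = l.flatMap g := by
  induction l with
  | nil => rfl
  | cons x xs ih =>
    rw [List.flatMap_cons, List.flatMap_cons, h x List.mem_cons_self,
      ih (fun y hy => h y (List.mem_cons_of_mem _ hy))]

theorem pv_flatMap_perm_congr {α β : Type} (l : List α) (f g : α → List β)
    (h : ∀ x ∈ l, (f x).Perm (g x)) : (l.flatMap f).Perm (l.flatMap g) := by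
  induction l with
  | nil => exact List.Perm.refl _
  | cons x xs ih =>
    rw [List.flatMap_cons, List.flatMap_cons]
    exact (h x List.mem_cons_self).append (ih (fun y hy => h y (List.mem_cons_of_mem _ hy)))

theorem pv_sortedGroup_pairwise (m : List (String × List (String × String))) (c : String)
    (hm : (m.map Prod.fst).Nodup) :
    (pvSortedGroup m c).Pairwise (fun a b => a.1 < b.1) := by
  have hle : (pvSortedGroup m c).Pairwise (fun a b => a.1 ≤ b.1) :=
    PySem.List.sorted_pairwise _ _
  have h1 : (((pvGroup m).getD c []).map Prod.fst).Nodup := by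
    rw [pv_group_getD, List.map_map]
    exact hm.sublist (List.Sublist.map _ List.filter_sublist)
  have hnd : ((pvSortedGroup m c).map Prod.fst).Nodup :=
    (((PySem.List.sorted_perm _ _ _).map Prod.fst).nodup_iff).mpr h1
  have hne : (pvSortedGroup m c).Pairwise (fun a b => a.1 ≠ b.1) := List.pairwise_map.mp hnd
  exact (hle.and hne).imp (fun h => lt_of_le_of_ne h.1 h.2)

theorem pv_pairwise_flatMap (ps : List (Int × String))
    (f : Int × String → List (Int × String × String × String))
    (hps : ps.Pairwise (fun p q => p.1 < q.1))
    (hfst : ∀ p ∈ ps, ∀ t ∈ f p, t.1 = p.1)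
    (hblk : ∀ p ∈ ps, (f p).Pairwise pvLex) :
    (ps.flatMap f).Pairwise pvLex := by
  induction ps with
  | nil => simp
  | cons p ps ih =>
    rw [List.pairwise_cons] at hps
    rw [List.flatMap_cons, List.pairwise_append]
    refine ⟨hblk p List.mem_cons_self,
      ih hps.2 (fun q hq => hfst q (List.mem_cons_of_mem _ hq))
        (fun q hq => hblk q (List.mem_cons_of_mem _ hq)), ?_⟩
    intro a ha b hb
    obtain ⟨q, hq, hbq⟩ := List.mem_flatMap.mp hb
    left
    rw [hfst p List.mem_cons_self a ha, hfst q (List.mem_cons_of_mem _ hq) b hbq]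
    exact hps.1 q hq

theorem pv_T_pairwise (m : List (String × List (String × String)))
    (hm : (m.map Prod.fst).Nodup) : (pvT m).Pairwise pvLex := by
  unfold pvT
  apply pv_pairwise_flatMap
  · exact pv_enum_pairwise _ _
  · intro p _ t ht
    obtain ⟨nd, _, rfl⟩ := List.mem_map.mp ht
    rfl
  · intro p _
    rw [List.pairwise_map]
    exact (pv_sortedGroup_pairwise m p.2 hm).imp (fun h => Or.inr ⟨rfl, h⟩)

theorem pv_partition_perm (cs : List String) (l : List (String × List (String × String)))
    (hcs : cs.Nodup) (hcov : ∀ kv ∈ l, pvCat kv ∈ cs) :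
    (cs.flatMap (fun c => l.filter (fun kv => pvCat kv == c))).Perm l := by
  induction cs generalizing l with
  | nil =>
    cases l with
    | nil => simp
    | cons kv l => exact absurd (hcov kv List.mem_cons_self) (List.not_mem_nil)
  | cons c cs ih =>
    rw [List.flatMap_cons]
    have hstep : ∀ q ∈ cs, l.filter (fun kv => pvCat kv == q)
        = (l.filter (fun kv => !(pvCat kv == c))).filter (fun kv => pvCat kv == q) := by
      intro q hq
      rw [List.filter_filter]
      apply List.filter_congr
      intro kv _
      by_cases h : pvCat kv = q
      · have hqc : ¬ pvCat kv = c := by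
          intro hc
          apply (List.nodup_cons.mp hcs).1
          rw [← hc, h]
          exact hq
        have hqe : (q == c) = false := by
          simp only [beq_eq_false_iff_ne, ne_eq]
          exact fun e => hqc (h.trans e)
        simp [h, hqe]
      · simp [h]
    rw [pv_flatMap_congr _ _ _ hstep]
    have ihp := ih (l.filter (fun kv => !(pvCat kv == c))) (List.nodup_cons.mp hcs).2 ?cov
    case cov =>
      intro kv hkv
      rw [List.mem_filter] at hkv
      have := hcov kv hkv.1
      rw [List.mem_cons] at this
      rcases this with h | h
      · simp [h] at hkv
      · exact h
    exact ((List.Perm.append_left _ ihp).trans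
      (List.filter_append_perm (fun kv => pvCat kv == c) l))

theorem pv_T_perm (m : List (String × List (String × String))) :
    (pvT m).Perm (m.map (pvEntry m)) := by
  unfold pvT
  have h1 : (pvT m).Perm ((PySem.List.enumerate (pvCats m)).flatMap
      (fun ic => ((pvGroup m).getD ic.2 []).map (fun nd => (ic.1, nd.1, ic.2, nd.2)))) := by
    apply pv_flatMap_perm_congr
    intro ic _
    exact (PySem.List.sorted_perm _ _ _).map _
  have h2 : (PySem.List.enumerate (pvCats m)).flatMap
      (fun ic => ((pvGroup m).getD ic.2 []).map (fun nd => (ic.1, nd.1, ic.2, nd.2)))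
      = (PySem.List.enumerate (pvCats m)).flatMap
      (fun ic => (m.filter (fun kv => pvCat kv == ic.2)).map (pvEntry m)) := by
    apply pv_flatMap_congr
    intro ic hic
    rw [pv_group_getD, List.map_map]
    apply List.map_congr_left
    intro kv hkv
    have hc : pvCat kv = ic.2 := by simpa using (List.mem_filter.mp hkv).2
    have hr2 : (pvRank m).getD ic.2 0 = ic.1 :=
      pv_rank_getD m ic.1 ic.2 (by simpa using hic)
    simp [pvEntry, hc, hr2]
  have h3 : (PySem.List.enumerate (pvCats m)).flatMap
      (fun ic => (m.filter (fun kv => pvCat kv == ic.2)).map (pvEntry m))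
      = ((pvCats m).flatMap (fun c => m.filter (fun kv => pvCat kv == c))).map (pvEntry m) := by
    rw [List.map_flatMap]
    exact pv_flatMap_enum (pvCats m) 0
      (fun c => (m.filter (fun kv => pvCat kv == c)).map (pvEntry m))
  have h4 : ((pvCats m).flatMap (fun c => m.filter (fun kv => pvCat kv == c))).Perm m := by
    apply pv_partition_perm _ _ (pv_cats_nodup m)
    intro kv hkv
    rw [pv_mem_cats, pv_mem_pres]
    exact ⟨kv, hkv, rfl⟩
  exact h1.trans (h2 ▸ h3 ▸ h4.map (pvEntry m))

theorem pv_entries_eq (m : List (String × List (String × String)))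
    (hm : (m.map Prod.fst).Nodup) :
    PySem.List.sorted2 (m.map (pvEntry m)) (fun t => t.1) (fun t => t.2.1) false = pvT m := by
  apply pv_sorted2_eq
  · exact pv_T_perm m
  · exact pv_T_pairwise m hm

-- ===== the emission pass of port B over the ordered blocks =====

theorem pv_fold_rows (l : List (Int × String × String × String)) (i : Int)
    (hl : ∀ t ∈ l, t.1 = i) (lines : List String) :
    l.foldl pvEmit (lines, some i) =
      (lines ++ l.map (fun t => pvRowB t.2.1 t.2.2.2), some i) := by
  induction l generalizing lines with
  | nil => simp
  | cons t ts ih =>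
    rw [List.foldl_cons]
    have ht : t.1 = i := hl t List.mem_cons_self
    have hemit : pvEmit (lines, some i) t = (lines ++ [pvRowB t.2.1 t.2.2.2], some i) := by
      simp [pvEmit, ht]
    rw [hemit, ih (fun u hu => hl u (List.mem_cons_of_mem _ hu))]
    simp

theorem pv_fold_blocks (ps : List (Int × String))
    (f : Int × String → List (Int × String × String × String)) :
    ∀ (prev : Option Int) (lines : List String),
    ps.Pairwise (fun p q => p.1 < q.1) →
    (∀ p ∈ ps, prev ≠ some p.1) →
    (∀ p ∈ ps, ∀ t ∈ f p, t.1 = p.1 ∧ t.2.2.1 = p.2) →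
    (∀ p ∈ ps, f p ≠ []) →
    (ps.flatMap f).foldl pvEmit (lines, prev) =
      (lines ++ ps.flatMap (fun p => pvHeaderB p.2 :: (f p).map (fun t => pvRowB t.2.1 t.2.2.2)),
       (ps.map (fun p => some p.1)).getLastD prev) := by
  induction ps with
  | nil => intro prev lines _ _ _ _; simp
  | cons p ps ih =>
    intro prev lines hps hprev hfst hne
    rw [List.pairwise_cons] at hps
    rw [List.flatMap_cons, List.foldl_append]
    cases hfp : f p with
    | nil => exact absurd hfp (hne p List.mem_cons_self)
    | cons t0 ts =>
      have ht0 := hfst p List.mem_cons_self t0 (hfp ▸ List.mem_cons_self)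
      have hemit : pvEmit (lines, prev) t0
          = ((lines ++ [pvHeaderB t0.2.2.1]) ++ [pvRowB t0.2.1 t0.2.2.2], some t0.1) := by
        simp [pvEmit, hprev p List.mem_cons_self, ht0.1]
      rw [List.foldl_cons, hemit, ht0.1, ht0.2,
        pv_fold_rows ts p.1
          (fun u hu => (hfst p List.mem_cons_self u (hfp ▸ List.mem_cons_of_mem _ hu)).1) _,
        ih (some p.1) _ hps.2
          (fun q hq heq => by
            have := hps.1 q hq
            rw [Option.some.injEq] at heq
            omega)
          (fun q hq => hfst q (List.mem_cons_of_mem _ hq))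
          (fun q hq => hne q (List.mem_cons_of_mem _ hq))]
      rw [List.flatMap_cons, hfp,
        show (List.map (fun p : Int × String => some p.1) (p :: ps)).getLastD prev
            = (List.map (fun p : Int × String => some p.1) ps).getLastD (some p.1) from by
          rw [List.map_cons, List.getLastD_cons]]
      simp [List.append_assoc]

theorem pv_lines_eq (m : List (String × List (String × String))) :
    ((pvT m).foldl pvEmit ([], none)).1 = pvRows m := by
  unfold pvT
  rw [pv_fold_blocks _ _ none []
    (pv_enum_pairwise _ _)
    (fun p _ => by simp)
    (fun p _ t ht => by obtain ⟨nd, _, rfl⟩ := List.mem_map.mp ht; exact ⟨rfl, rfl⟩)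
    ?nonempty]
  case nonempty =>
    intro p hp
    simp only [ne_eq, List.map_eq_nil_iff, PySem.List.sorted_eq_nil_iff, pvSortedGroup]
    have hc : p.2 ∈ pvPres m := (pv_mem_cats m p.2).mp (pv_enum_snd_mem _ _ _ hp)
    obtain ⟨kv, hkv, hck⟩ := (pv_mem_pres m p.2).mp hc
    rw [pv_group_getD]
    simp only [List.map_eq_nil_iff, List.filter_eq_nil_iff]
    intro h
    exact h kv hkv (by simp [hck])
  simp only [pvRows]
  rw [show (fun p : Int × String => pvHeaderB p.2 ::
      ((pvSortedGroup m p.2).map (fun nd => (p.1, nd.1, p.2, nd.2))).map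
        (fun t => pvRowB t.2.1 t.2.2.2))
      = (fun p : Int × String => pvBlockOut m p.2) from ?_, pv_flatMap_enum]
  · simp
  · funext p
    rw [List.map_map]
    rfl

-- ===== closed forms of the two ports =====

theorem pv_A_eq (m : List (String × List (String × String))) :
    get_module_cli_desc m = PySem.Str.join "\n" (pvRows m) := by
  have h0 : get_module_cli_desc m = PySem.Str.join "\n"
      ((pvOrderA.filter (fun c => (pvGroup m).contains c)
        ++ PySem.List.sorted ((pvGroup m).keys.filter (fun c => !pvOrderA.contains c))
            (fun c => c) false).foldl
        (fun rows cat =>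
          (PySem.List.sorted ((pvGroup m).getD cat []) (fun x => x.1) false).foldl
            (fun rows nd => rows ++ [pvRowA nd.1 nd.2]) (rows ++ [pvHeaderA cat])) []) := rfl
  rw [h0]
  have hcontains : ∀ c, (pvGroup m).contains c = (pvPres m).contains c := by
    intro c
    rw [pv_contains_eq, pv_group_keys]
  have hcats : (pvOrderA.filter (fun c => (pvGroup m).contains c)
      ++ PySem.List.sorted ((pvGroup m).keys.filter (fun c => !pvOrderA.contains c))
          (fun c => c) false) = pvCats m := by
    unfold pvCats
    rw [pv_group_keys]
    congr 1
    exact List.filter_congr (fun c _ => hcontains c)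
  rw [hcats]
  have hstep : ∀ (rows : List String), ∀ c ∈ pvCats m,
      (PySem.List.sorted ((pvGroup m).getD c []) (fun x => x.1) false).foldl
        (fun rows nd => rows ++ [pvRowA nd.1 nd.2]) (rows ++ [pvHeaderA c])
      = rows ++ pvBlockOut m c := by
    intro rows c _
    rw [PySem.List.foldl_append_singleton_eq_map (fun nd : String × String => pvRowA nd.1 nd.2)]
    simp [pvBlockOut, pvSortedGroup]
  rw [PySem.List.foldl_congr_mem _ _ _ _ (by intro rows c hc; exact hstep rows c hc),
    PySem.List.foldl_append_eq_flatMap]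
  rfl

theorem pv_B_eq (m : List (String × List (String × String)))
    (hm : (m.map Prod.fst).Nodup) :
    get_module_cli_desc_alt m = PySem.Str.join "\n" (pvRows m) := by
  have h0 : get_module_cli_desc_alt m = PySem.Str.join "\n"
      (((PySem.List.sorted2 (m.map (pvEntry m)) (fun t => t.1) (fun t => t.2.1) false).foldl
        pvEmit ([], none)).1) := rfl
  rw [h0, pv_entries_eq m hm, pv_lines_eq]

-- ===== VERDICT (by name: the statement is the Claim_ definition above) =====
theorem get_module_cli_desc_spec : Claim_equal_get_module_cli_desc := by
  intro m _ hpre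
  unfold Spec_get_module_cli_desc
  rw [pv_A_eq, pv_B_eq m hpre.1]
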